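-- pv_equiv track=rewrite | github.com/tr0uble-mAker/iSee | iSee.py | find_base_domain
-- ===== SOURCE A (Python) =====
-- def find_base_domain(domain_list):
--     base_domain_dict = {}
--     for domain in domain_list:
--         base_domain = ''
--         base_domain_list = domain.split('.')
--         if len(base_domain_list) > 2:
--             base_domain_list.pop(0)
--             for host in base_domain_list:
--                 base_domain += host + '.'
--             base_domain = base_domain.rstrip('.')
--         else:
--             base_domain = domain
--         base_domain_key = base_domain
--         if base_domain_key in base_domain_dict.keys():
--             base_domain_dict[base_domain_key].append(domain)
--         else:
--             base_domain_dict[base_domain_key] = []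
--             base_domain_dict[base_domain_key].append(domain)
--     return base_domain_dict
-- ===== SOURCE B (Python) =====
-- def find_base_domain(domain_list):
--     # key-major regrouping: compute each domain's base key once, then build each
--     # bucket by filtering the (domain, key) pairs per first-seen distinct key
--     def base_key(domain):
--         parts = domain.split('.')
--         if len(parts) > 2:
--             return '.'.join(parts[1:]).rstrip('.')
--         return domain
--     keys = [base_key(d) for d in domain_list]
--     return {k: [d for d, kd in zip(domain_list, keys) if kd == k]
--             for k in dict.fromkeys(keys)}
-- ===== Notes on version B (the rewrite author's own statement) =====
-- stated objective: alternative
-- what changed: A builds the dict in one input-order pass, testing membership and appending per element; B first maps every domain to its base key, then iterates over the first-occurrence-distinct keys and builds each bucket in one filtering comprehension over the (domain, key) pairs (key-major instead of element-major grouping).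
import Mathlib
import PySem

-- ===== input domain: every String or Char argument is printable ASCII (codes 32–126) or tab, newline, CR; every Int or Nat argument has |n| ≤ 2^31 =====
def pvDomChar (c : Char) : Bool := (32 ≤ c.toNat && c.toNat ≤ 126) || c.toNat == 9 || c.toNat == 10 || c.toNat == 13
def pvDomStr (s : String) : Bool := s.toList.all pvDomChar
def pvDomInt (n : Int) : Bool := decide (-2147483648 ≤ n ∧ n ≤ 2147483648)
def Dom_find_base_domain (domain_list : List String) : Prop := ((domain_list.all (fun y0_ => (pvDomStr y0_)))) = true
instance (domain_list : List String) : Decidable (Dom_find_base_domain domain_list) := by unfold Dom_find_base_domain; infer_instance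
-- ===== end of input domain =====

-- B regroups key-major (distinct keys, then one filtering pass per key) instead of A's
-- element-major dict-append pass; objective: alternative decomposition, same results.

-- shared primitives (ports of the Python built-ins both sources call):
-- s.rstrip('.') — exact: removes all trailing '.' characters (char-list form + String wrapper)
def charsRstripDots (cs : List Char) : List Char := (cs.reverse.dropWhile (fun c => c == '.')).reverse
def pyRstripDots (s : String) : String := String.ofList (charsRstripDots s.toList)
-- s.split('.') — exact via PySem.Chars.splitOn (separator nonempty)
def pySplitDots (s : String) : List String := (PySem.Chars.splitOn s.toList ['.']).map String.ofList

-- ===== PORT A =====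
def find_base_domain (domain_list : List String) : List (String × List String) :=
  (domain_list.foldl
    (fun (d : PySem.Dict String (List String)) domain =>
      let base_domain_list := pySplitDots domain
      let base_domain :=
        if base_domain_list.length > 2 then
          -- pop(0) then accumulate host + '.' and rstrip the trailing dots
          pyRstripDots ((base_domain_list.drop 1).foldl (fun acc host => acc ++ host ++ ".") "")
        else domain
      if d.contains base_domain then d.modify base_domain [] (fun xs => xs ++ [domain])
      else (d.insert base_domain []).modify base_domain [] (fun xs => xs ++ [domain]))
    PySem.Dict.empty).items

-- ===== PORT B =====
def baseKey (domain : String) : String :=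
  let parts := pySplitDots domain
  if parts.length > 2 then pyRstripDots (PySem.Str.join "." (parts.drop 1)) else domain

def find_base_domain_alt (domain_list : List String) : List (String × List String) :=
  let keys := domain_list.map baseKey
  (PySem.List.dedup keys).map (fun k =>
    (k, ((domain_list.zip keys).filter (fun p => p.2 == k)).map (fun p => p.1)))

-- ===== PRECONDITION & SPEC =====
def Spec_find_base_domain (domain_list : List String) (out : List (String × List String)) : Prop := out = find_base_domain_alt domain_list
instance (domain_list : List String) (out : List (String × List String)) : Decidable (Spec_find_base_domain domain_list out) := by unfold Spec_find_base_domain; infer_instance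

-- ===== CLAIM (what is proved, stated in full; the proofs are below) =====
def Claim_equal_find_base_domain : Prop := ∀ (domain_list : List String), Dom_find_base_domain domain_list → Spec_find_base_domain domain_list (find_base_domain domain_list)

-- ===== LEMMAS AND PROOFS =====

-- the generic grouping step A performs per element, with key function κ
def gstep {α β : Type} [BEq β] (κ : α → β) (d : PySem.Dict β (List α)) (x : α) : PySem.Dict β (List α) :=
  if d.contains (κ x) then d.modify (κ x) [] (fun xs => xs ++ [x])
  else (d.insert (κ x) []).modify (κ x) [] (fun xs => xs ++ [x])

theorem char_foldl_dots (l : List String) (a : String) :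
    (l.foldl (fun acc h => acc ++ h ++ ".") a).toList
      = a.toList ++ ((l.map String.toList).map (· ++ ['.'])).flatten := by
  induction l generalizing a with
  | nil => simp
  | cons h t ih => simp [ih, String.toList_append]

theorem flatten_dots_eq_join (cs : List (List Char)) (c : List Char) :
    ((c :: cs).map (· ++ ['.'])).flatten = PySem.Chars.join ['.'] (c :: cs) ++ ['.'] := by
  induction cs generalizing c with
  | nil => simp [PySem.Chars.join_singleton]
  | cons c2 t ih =>
    rw [List.map_cons, List.flatten_cons, ih c2, PySem.Chars.join_cons_cons]
    simp [List.append_assoc]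

theorem charsRstripDots_append_dot (x : List Char) :
    charsRstripDots (x ++ ['.']) = charsRstripDots x := by
  simp [charsRstripDots]

theorem keyA_eq (domain : String) :
    (let base_domain_list := pySplitDots domain
     if base_domain_list.length > 2 then
       pyRstripDots ((base_domain_list.drop 1).foldl (fun acc host => acc ++ host ++ ".") "")
     else domain) = baseKey domain := by
  unfold baseKey
  by_cases h : (pySplitDots domain).length > 2
  · simp only [h, if_pos]
    rcases hr : (pySplitDots domain).drop 1 with _ | ⟨r, rt⟩
    · exfalso; have := congrArg List.length hr; simp at this; omega
    · unfold pyRstripDots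
      congr 1
      rw [char_foldl_dots, List.map_cons, flatten_dots_eq_join]
      have hdot : ("." : String).toList = ['.'] := rfl
      have hnil : ("" : String).toList = ([] : List Char) := rfl
      rw [hnil, List.nil_append, charsRstripDots_append_dot]
      simp only [PySem.Str.join, String.toList_ofList, hdot, List.map_cons]
  · simp [h]

theorem stepA_eq :
    (fun (d : PySem.Dict String (List String)) domain =>
      let base_domain_list := pySplitDots domain
      let base_domain :=
        if base_domain_list.length > 2 then
          pyRstripDots ((base_domain_list.drop 1).foldl (fun acc host => acc ++ host ++ ".") "")
        else domain
      if d.contains base_domain then d.modify base_domain [] (fun xs => xs ++ [domain])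
      else (d.insert base_domain []).modify base_domain [] (fun xs => xs ++ [domain]))
    = gstep baseKey := by
  funext d domain
  simp only [keyA_eq domain, gstep]

theorem dedup_append_singleton {β : Type} [BEq β] [LawfulBEq β] (xs : List β) (x : β) :
    PySem.List.dedup (xs ++ [x]) = if x ∈ xs then PySem.List.dedup xs else PySem.List.dedup xs ++ [x] := by
  have h1 : PySem.List.dedup (xs ++ [x]) = PySem.Set.add (PySem.Set.ofList xs) x := by
    simp [PySem.List.dedup, PySem.Set.ofList, List.foldl_append]
  have hmem : x ∈ PySem.Set.ofList xs ↔ x ∈ xs := PySem.Set.mem_ofList xs x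
  rw [h1, PySem.Set.add]
  by_cases hx : x ∈ xs
  · rw [if_pos (by simp [PySem.Set.contains, hmem, hx]), if_pos hx]
    rfl
  · rw [if_neg (by simp [PySem.Set.contains, hmem, hx]), if_neg hx]
    rfl

theorem getD_canon {α β : Type} [BEq β] [LawfulBEq β] (ks : List β) (f : β → List α) (k : β)
    (hk : k ∈ ks) : (PySem.Dict.mk (ks.map (fun k' => (k', f k')))).getD k [] = f k := by
  induction ks with
  | nil => simp at hk
  | cons a t ih =>
    by_cases ha : a = k
    · subst ha; simp [PySem.Dict.getD, PySem.Dict.get?_mk_cons]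
    · have hk' : k ∈ t := by
        rcases List.mem_cons.mp hk with h | h
        · exact absurd h.symm ha
        · exact h
      have := ih hk'
      simp only [List.map_cons] at *
      simp only [PySem.Dict.getD, PySem.Dict.get?_mk_cons, ha] at this ⊢
      simpa [ha] using this

theorem contains_canon {α β : Type} [BEq β] [LawfulBEq β] [DecidableEq β] (ks : List β) (f : β → List α) (k : β) :
    (PySem.Dict.mk (ks.map (fun k' => (k', f k')))).contains k = decide (k ∈ ks) := by
  induction ks with
  | nil => rfl
  | cons a t ih =>
    simp only [PySem.Dict.contains] at *
    by_cases ha : a = k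
    · simp [ha, ih, List.mem_cons]
    · have h1 : (a == k) = false := by simp [ha]
      have h2 : decide (k = a) = false := by
        simp only [decide_eq_false_iff_not]
        exact fun h => ha h.symm
      simp [h1, h2, ih, List.mem_cons]

theorem group_fold {α β : Type} [BEq β] [LawfulBEq β] [DecidableEq β] (κ : α → β) (l : List α) :
    (List.foldl (gstep κ) PySem.Dict.empty l).items
      = (PySem.List.dedup (l.map κ)).map (fun k => (k, l.filter (fun x => κ x == k))) := by
  induction l using List.reverseRecOn with
  | nil => simp [PySem.Dict.empty, PySem.List.dedup, PySem.Set.ofList]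
  | append_singleton l x ih =>
    rw [List.foldl_append, List.foldl_cons, List.foldl_nil]
    set D := List.foldl (gstep κ) PySem.Dict.empty l with hDdef
    have hD : D = PySem.Dict.mk ((PySem.List.dedup (l.map κ)).map
        (fun k => (k, l.filter (fun x => κ x == k)))) := by
      apply PySem.Dict.ext_iff.mpr; exact ih
    have hmemdedup : ∀ k, k ∈ PySem.List.dedup (l.map κ) ↔ k ∈ l.map κ := by
      intro k; simpa [PySem.List.dedup] using PySem.Set.mem_ofList (l.map κ) k
    have hcont : D.contains (κ x) = decide (κ x ∈ l.map κ) := by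
      rw [hD, contains_canon]
      by_cases h : κ x ∈ l.map κ <;> simp [h]
    rw [List.map_append, List.map_cons, List.map_nil, dedup_append_singleton]
    by_cases hx : κ x ∈ l.map κ
    · -- existing key: modify appends x to its bucket
      simp only [hx, if_pos]
      rw [gstep, hcont]
      simp only [hx, decide_true, if_pos]

      rw [PySem.Dict.modify, hD, getD_canon _ _ _ ((hmemdedup (κ x)).mpr hx)]
      rw [PySem.Dict.insert]
      have hc2 : (PySem.Dict.mk ((PySem.List.dedup (l.map κ)).map
          (fun k => (k, l.filter (fun y => κ y == k))))).contains (κ x) = true := by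
        rw [contains_canon]; simp [hx]
      rw [hc2, if_pos rfl]
      show List.map _ (List.map _ _) = _
      rw [List.map_map]
      apply List.map_congr_left
      intro k' _
      by_cases hk' : k' = κ x
      · subst hk'
        simp [List.filter_append]
      · have hthis : (k' == κ x) = false := by simp [hk']
        have hne : (κ x == k') = false := by
          simp only [beq_eq_false_iff_ne, ne_eq]
          exact fun h => hk' h.symm
        simp [Function.comp, hthis, List.filter_append, hne]
    · -- new key: insert [] then append x ⇒ items gain (κ x, [x]) at the end
      simp only [hx, ite_false]
      rw [gstep, hcont]
      simp only [hx, decide_false, Bool.false_eq_true, if_false]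
      rw [PySem.Dict.modify, PySem.Dict.getD_insert, PySem.Dict.insert_insert_self]
      rw [PySem.Dict.insert, hcont]
      simp only [hx, decide_false, Bool.false_eq_true, if_false]
      rw [List.map_append, List.map_cons, List.map_nil]
      congr 1
      · rw [hD]
        show List.map _ _ = _
        apply List.map_congr_left
        intro k' hk'
        have hk'mem : k' ∈ l.map κ := (hmemdedup k').mp hk'
        have hne : (κ x == k') = false := by
          simp only [beq_eq_false_iff_ne, ne_eq]
          intro h; exact hx (h ▸ hk'mem)
        simp [List.filter_append, hne]
      · have hfilt : l.filter (fun y => κ y == κ x) = [] := by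
          rw [List.filter_eq_nil_iff]
          intro a ha
          simp only [beq_iff_eq]
          intro h; exact hx (h ▸ List.mem_map_of_mem ha)
        simp [List.filter_append, hfilt]

theorem zip_filter_map {α β : Type} [BEq β] (κ : α → β) (l : List α) (k : β) :
    ((l.zip (l.map κ)).filter (fun p => p.2 == k)).map (fun p => p.1)
      = l.filter (fun x => κ x == k) := by
  induction l with
  | nil => rfl
  | cons a t ih =>
    simp only [List.map_cons, List.zip_cons_cons, List.filter_cons]
    by_cases h : (κ a == k) = true
    · simp [h, ih]
    · simp only [h] at *
      simp [ih]

-- ===== VERDICT (by name: the statement is the Claim_ definition above) =====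
theorem find_base_domain_spec : Claim_equal_find_base_domain := by
  intro domain_list _
  unfold Spec_find_base_domain
  show find_base_domain domain_list = find_base_domain_alt domain_list
  unfold find_base_domain
  rw [stepA_eq, group_fold]
  unfold find_base_domain_alt
  apply List.map_congr_left
  intro k _
  rw [zip_filter_map]
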